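-- pv_equiv track=rewrite | github.com/shodohq/enginegen | enginegen/plugins_builtin/geometry_fidget.py | _summarize_checks
-- ===== SOURCE A (Python) =====
-- from typing import Any, Dict, List, Optional, Tuple
--
-- def _summarize_checks(results: List[Dict[str, Any]]) -> Dict[str, int]:
--     counts = {"PASS": 0, "WARN": 0, "FAIL": 0}
--     for result in results:
--         status = result.get("status")
--         if status in counts:
--             counts[status] += 1
--     return {
--         "count": len(results),
--         "pass": counts["PASS"],
--         "warn": counts["WARN"],
--         "fail": counts["FAIL"],
--     }
-- ===== SOURCE B (Python) =====
-- from typing import Any, Dict, List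
--
-- def _summarize_checks(results: List[Dict[str, Any]]) -> Dict[str, int]:
--     count = len(results)
--     pass_ = sum(1 for r in results if r.get("status") == "PASS")
--     warn_ = sum(1 for r in results if r.get("status") == "WARN")
--     fail_ = sum(1 for r in results if r.get("status") == "FAIL")
--     return {"count": count, "pass": pass_, "warn": warn_, "fail": fail_}
-- ===== Notes on version B (the rewrite author's own statement) =====
-- stated objective: simpler
-- what changed: Replaced the single loop that maintains a mutable counts dict (with a membership test and keyed increment per element) by one independent filtered count per status category, with no dictionary accumulator at all.
import Mathlib
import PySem

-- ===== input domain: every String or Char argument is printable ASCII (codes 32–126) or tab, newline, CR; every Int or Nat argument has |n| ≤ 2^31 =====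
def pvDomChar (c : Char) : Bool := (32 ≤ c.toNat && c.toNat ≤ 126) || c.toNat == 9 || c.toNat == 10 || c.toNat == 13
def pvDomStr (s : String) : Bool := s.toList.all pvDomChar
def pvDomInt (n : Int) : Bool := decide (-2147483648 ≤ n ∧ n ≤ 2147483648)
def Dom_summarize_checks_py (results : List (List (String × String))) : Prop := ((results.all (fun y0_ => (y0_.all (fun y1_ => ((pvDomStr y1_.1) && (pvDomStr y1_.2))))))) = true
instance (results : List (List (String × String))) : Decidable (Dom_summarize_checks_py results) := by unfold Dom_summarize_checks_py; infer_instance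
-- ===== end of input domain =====

-- B replaces A's single-pass mutable counts dict by one independent filtered count per category (simpler decomposition; same O(n) cost).

-- ===== PORT A =====
-- result.get("status"): first-match lookup in the association list (type convention for dict arguments)
def pvStatusOf (r : List (String × String)) : Option String :=
  (r.find? (fun p => p.1 == "status")).map (·.2)

-- the loop body: status = result.get("status"); if status in counts: counts[status] += 1
def pvStepA (counts : PySem.Dict String Int) (result : List (String × String)) : PySem.Dict String Int :=
  match pvStatusOf result with
  | some s => if counts.contains s then counts.modify s 0 (· + 1) else counts
  | none => counts

def summarize_checks_py (results : List (List (String × String))) : List (String × Int) :=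
  let counts0 : PySem.Dict String Int :=
    ((PySem.Dict.empty.insert "PASS" 0).insert "WARN" 0).insert "FAIL" 0
  let counts := results.foldl pvStepA counts0
  [("count", (results.length : Int)),
   ("pass", counts.getD "PASS" 0),
   ("warn", counts.getD "WARN" 0),
   ("fail", counts.getD "FAIL" 0)]

-- ===== PORT B =====
-- sum(1 for r in results if r.get("status") == S)
def pvCatCount (results : List (List (String × String))) (s : String) : Int :=
  (results.countP (fun r => pvStatusOf r == some s) : Int)

def summarize_checks_py_alt (results : List (List (String × String))) : List (String × Int) :=
  [("count", (results.length : Int)),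
   ("pass", pvCatCount results "PASS"),
   ("warn", pvCatCount results "WARN"),
   ("fail", pvCatCount results "FAIL")]

-- ===== PRECONDITION & SPEC =====
def Spec_summarize_checks_py (results : List (List (String × String))) (out : List (String × Int)) : Prop := out = summarize_checks_py_alt results
instance (results : List (List (String × String))) (out : List (String × Int)) : Decidable (Spec_summarize_checks_py results out) := by unfold Spec_summarize_checks_py; infer_instance

-- ===== CLAIM (what is proved, stated in full; the proofs are below) =====
def Claim_equal_summarize_checks_py : Prop := ∀ (results : List (List (String × String))), Dom_summarize_checks_py results → Spec_summarize_checks_py results (summarize_checks_py results)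

-- ===== LEMMAS AND PROOFS =====

-- loop invariant: over any dict with exactly the three status keys, A's loop adds each category's count
theorem pvLoopInv (results : List (List (String × String))) (d : PySem.Dict String Int)
    (h : d.keys = ["PASS", "WARN", "FAIL"]) :
    (results.foldl pvStepA d).getD "PASS" 0 = d.getD "PASS" 0 + pvCatCount results "PASS" ∧
    (results.foldl pvStepA d).getD "WARN" 0 = d.getD "WARN" 0 + pvCatCount results "WARN" ∧
    (results.foldl pvStepA d).getD "FAIL" 0 = d.getD "FAIL" 0 + pvCatCount results "FAIL" := by
  induction results generalizing d with
  | nil => simp [pvCatCount]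
  | cons r rest ih =>
    have hkeys : ∀ s, d.contains s = true ↔ s = "PASS" ∨ s = "WARN" ∨ s = "FAIL" := by
      intro s
      rw [PySem.Dict.contains_iff_mem_keys, h]
      simp
    have hkstep : (pvStepA d r).keys = ["PASS", "WARN", "FAIL"] := by
      rcases hst : pvStatusOf r with _ | s'
      · simp [pvStepA, hst, h]
      · by_cases hc : d.contains s' = true
        · simp only [pvStepA, hst, hc, if_true]
          rw [PySem.Dict.keys_modify]
          simp [PySem.Dict.keys_insert_of_contains, hc, h]
        · simp [pvStepA, hst, hc, h]
    have ihs := ih (pvStepA d r) hkstep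
    have hcat : ∀ s, pvCatCount (r :: rest) s =
        (if pvStatusOf r == some s then 1 else 0) + pvCatCount rest s := by
      intro s
      unfold pvCatCount
      rw [List.countP_cons]
      split <;> push_cast <;> ring
    have hget : ∀ t, t = "PASS" ∨ t = "WARN" ∨ t = "FAIL" →
        (pvStepA d r).getD t 0 = d.getD t 0 + (if pvStatusOf r == some t then 1 else 0) := by
      intro t ht
      rcases hst : pvStatusOf r with _ | s'
      · simp [pvStepA, hst]
      · by_cases hc : d.contains s' = true
        · simp only [pvStepA, hst, hc, if_true]
          rw [PySem.Dict.getD_modify]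
          by_cases hts : t = s'
          · subst hts; simp
          · rw [if_neg hts]
            simp [Ne.symm hts]
        · have hne : ¬ (s' = t) := by
            intro he; subst he
            exact hc ((hkeys _).mpr ht)
          simp [pvStepA, hst, hc, hne]
    simp only [List.foldl_cons]
    refine ⟨?_, ?_, ?_⟩
    · rw [ihs.1, hget "PASS" (Or.inl rfl), hcat "PASS"]; ring
    · rw [ihs.2.1, hget "WARN" (Or.inr (Or.inl rfl)), hcat "WARN"]; ring
    · rw [ihs.2.2, hget "FAIL" (Or.inr (Or.inr rfl)), hcat "FAIL"]; ring

-- ===== VERDICT (by name: the statement is the Claim_ definition above) =====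
theorem summarize_checks_py_spec : Claim_equal_summarize_checks_py := by
  intro results _
  unfold Spec_summarize_checks_py summarize_checks_py summarize_checks_py_alt
  have h0 : (((PySem.Dict.empty.insert "PASS" (0 : Int)).insert "WARN" 0).insert "FAIL" 0).keys
      = ["PASS", "WARN", "FAIL"] := by decide
  obtain ⟨hp, hw, hf⟩ := pvLoopInv results _ h0
  simp only
  rw [hp, hw, hf]
  norm_num
  decide
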